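-- pv_equiv track=rewrite | github.com/manojnayakkuna/leetcode_easy | leetcode_1309_decryptStringFromAlphabetIntegerMapping.py | freqAlphabetsDict
-- ===== SOURCE A (Python) =====
-- def freqAlphabetsDict(s):
--     d = {'1':'a','2':'b','3':'c','4':'d','5':'e','6':'f','7':'g','8':'h','9':'i','10':'j','11':'k','12':'l','13':'m','14':'n','15':'o','16':'p',
--          '17':'q', '18':'r','19':'s','20':'t','21':'u','22':'v','23':'w','24':'x','25':'y','26':'z'}
--     string = ''
--     i = 0
--     while i < len(s):
--         if (i+2)<len(s) and s[i+2] == '#':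
--             string += d[s[i:i+2]]
--             i += 3
--         else:
--             string += d[s[i]]
--             i += 1
--     return string
-- ===== SOURCE B (Python) =====
-- def freqAlphabetsDict(s):
--     out = []
--     for ch in s:
--         if ch == '#':
--             d2 = ord(out.pop()) - 96
--             d1 = ord(out.pop()) - 96
--             out.append(chr(96 + 10 * d1 + d2))
--         else:
--             out.append(chr(96 + int(ch)))
--     return ''.join(out)
-- ===== Notes on version B (the rewrite author's own statement) =====
-- stated objective: alternative
-- what changed: B replaces A's dict-with-lookahead scan by a single forward char-by-char pass with a stack: each digit char is provisionally decoded arithmetically as chr(96+int(c)), and a '#' pops the last two provisional letters and merges them into the one two-digit letter; no dict and no lookahead.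
import Mathlib
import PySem

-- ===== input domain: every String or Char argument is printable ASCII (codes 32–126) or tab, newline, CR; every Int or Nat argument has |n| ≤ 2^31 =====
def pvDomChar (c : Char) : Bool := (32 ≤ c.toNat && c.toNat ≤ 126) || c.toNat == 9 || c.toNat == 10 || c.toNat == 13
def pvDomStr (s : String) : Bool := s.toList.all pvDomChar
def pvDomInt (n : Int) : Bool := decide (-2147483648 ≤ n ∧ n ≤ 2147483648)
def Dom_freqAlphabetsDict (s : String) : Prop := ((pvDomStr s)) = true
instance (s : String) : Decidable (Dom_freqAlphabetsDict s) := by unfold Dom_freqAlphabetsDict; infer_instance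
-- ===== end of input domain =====

-- B replaces A's dict-with-lookahead scan by a stack pass: each digit becomes a provisional
-- letter via chr/ord arithmetic, and '#' merges the last two letters into one two-digit letter.
-- Equivalence is proved on Pre_ = exactly the inputs where A returns (elsewhere A raises KeyError).

-- ===== PORT A =====
-- A's dict d; its 1/2-character string keys are represented as their char lists.
def pvDA : PySem.Dict (List Char) Char := PySem.Dict.ofList
  [(['1'],'a'),(['2'],'b'),(['3'],'c'),(['4'],'d'),(['5'],'e'),(['6'],'f'),(['7'],'g'),
   (['8'],'h'),(['9'],'i'),(['1','0'],'j'),(['1','1'],'k'),(['1','2'],'l'),(['1','3'],'m'),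
   (['1','4'],'n'),(['1','5'],'o'),(['1','6'],'p'),(['1','7'],'q'),(['1','8'],'r'),
   (['1','9'],'s'),(['2','0'],'t'),(['2','1'],'u'),(['2','2'],'v'),(['2','3'],'w'),
   (['2','4'],'x'),(['2','5'],'y'),(['2','6'],'z')]

-- A's while loop over index i, as recursion on the suffix s[i:]; `string` is the accumulator;
-- none = KeyError (d[...] missing).
def pvGoA : List Char → List Char → Option (List Char)
  | [], string => some string
  | c1 :: c2 :: c3 :: rest, string =>
      if c3 = '#' then
        match PySem.Dict.get? pvDA [c1, c2] with
        | some ch => pvGoA rest (string ++ [ch])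
        | none => none
      else
        match PySem.Dict.get? pvDA [c1] with
        | some ch => pvGoA (c2 :: c3 :: rest) (string ++ [ch])
        | none => none
  | c1 :: rest, string =>   -- fewer than 3 chars left: (i+2) < len(s) is false
      match PySem.Dict.get? pvDA [c1] with
      | some ch => pvGoA rest (string ++ [ch])
      | none => none

def freqAlphabetsDict (s : String) : String :=
  match pvGoA s.toList [] with
  | some string => String.mk string
  | none => ""    -- unreachable under Pre_: Python raises KeyError here

-- ===== PORT B =====
-- B's for-loop over the chars of s; `out` is B's stack of letters, kept head-first (head = the
-- top of the stack, i.e. the Python list's LAST element), so append = cons and pop = head.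
-- none = the exception Source B raises there (ValueError from int(ch), IndexError from pop on a
-- short stack); chr's Int argument is nonnegative whenever those branches are reached (every
-- stack entry has code ≥ 96), so .toNat is exact.
def pvGoB : List Char → List Char → Option (List Char)
  | [], out => some out
  | ch :: rest, out =>
      if ch = '#' then
        match out with
        | p2 :: p1 :: out' =>
            pvGoB rest
              (Char.ofNat ((96 + 10 * ((p1.toNat : Int) - 96) + ((p2.toNat : Int) - 96)).toNat)
                :: out')
        | _ => none   -- out.pop() on a list with < 2 elements: IndexError
      else
        match PySem.Int.ofStr? (String.mk [ch]) with
        | some n => pvGoB rest (Char.ofNat ((96 + n).toNat) :: out)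
        | none => none   -- int(ch): ValueError

def freqAlphabetsDict_alt (s : String) : String :=
  match pvGoB s.toList [] with
  | some out => String.mk out.reverse   -- ''.join(out): the stack is kept reversed
  | none => ""    -- unreachable under Pre_

-- ===== PRECONDITION & SPEC =====
def pvDig (c : Char) : Bool := decide (c ∈ ['1','2','3','4','5','6','7','8','9'])

def pvPair (c1 c2 : Char) : Bool := decide ((c1, c2) ∈
  [('1','0'),('1','1'),('1','2'),('1','3'),('1','4'),('1','5'),('1','6'),('1','7'),('1','8'),
   ('1','9'),('2','0'),('2','1'),('2','2'),('2','3'),('2','4'),('2','5'),('2','6')])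

-- the token grammar A's greedy scan accepts: single digits '1'-'9', or '10'-'26' followed by '#'
-- (a two-digit token is taken exactly when the char two places ahead is '#')
def pvValid : List Char → Bool
  | [] => true
  | [c] => pvDig c
  | [c1, c2] => pvDig c1 && pvDig c2
  | c1 :: c2 :: c3 :: rest =>
      if c3 = '#' then pvPair c1 c2 && pvValid rest
      else pvDig c1 && pvValid (c2 :: c3 :: rest)

-- Pre_ holds exactly on the inputs where Python A returns (everywhere else A raises KeyError).
def Pre_freqAlphabetsDict (s : String) : Prop := pvValid s.toList = true
instance (s : String) : Decidable (Pre_freqAlphabetsDict s) := by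
  unfold Pre_freqAlphabetsDict; infer_instance

def pvWitness_freqAlphabetsDict : String := "10#2"

def Spec_freqAlphabetsDict (s : String) (out : String) : Prop := out = freqAlphabetsDict_alt s
instance (s : String) (out : String) : Decidable (Spec_freqAlphabetsDict s out) := by
  unfold Spec_freqAlphabetsDict; infer_instance

-- ===== CLAIM (what is proved, stated in full; the proofs are below) =====
def Claim_equal_freqAlphabetsDict : Prop := ∀ (s : String), Dom_freqAlphabetsDict s → Pre_freqAlphabetsDict s → Spec_freqAlphabetsDict s (freqAlphabetsDict s)

-- ===== LEMMAS AND PROOFS =====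

-- the decoded letter of a single-digit / two-digit token
def pvL1 (c : Char) : Char := Char.ofNat (c.toNat + 48)
def pvL2 (c1 c2 : Char) : Char := Char.ofNat (10 * c1.toNat + c2.toNat - 432)

-- the decoded letters of a valid string, following the grammar's structure
def pvDec : List Char → List Char
  | [] => []
  | [c] => [pvL1 c]
  | [c1, c2] => [pvL1 c1, pvL1 c2]
  | c1 :: c2 :: c3 :: rest =>
      if c3 = '#' then pvL2 c1 c2 :: pvDec rest
      else pvL1 c1 :: pvDec (c2 :: c3 :: rest)

theorem pvDig_cases {c : Char} (h : pvDig c = true) :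
    c = '1' ∨ c = '2' ∨ c = '3' ∨ c = '4' ∨ c = '5' ∨ c = '6' ∨ c = '7' ∨ c = '8' ∨ c = '9' := by
  simpa [pvDig] using h

theorem pvPair_cases {c1 c2 : Char} (h : pvPair c1 c2 = true) :
    (c1 = '1' ∧ (c2 = '0' ∨ c2 = '1' ∨ c2 = '2' ∨ c2 = '3' ∨ c2 = '4' ∨ c2 = '5' ∨ c2 = '6' ∨
      c2 = '7' ∨ c2 = '8' ∨ c2 = '9')) ∨
    (c1 = '2' ∧ (c2 = '0' ∨ c2 = '1' ∨ c2 = '2' ∨ c2 = '3' ∨ c2 = '4' ∨ c2 = '5' ∨ c2 = '6')) := by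
  simp [pvPair, Prod.ext_iff] at h
  tauto

theorem pvLkA1 {c : Char} (h : pvDig c = true) :
    PySem.Dict.get? pvDA [c] = some (pvL1 c) := by
  rcases pvDig_cases h with rfl|rfl|rfl|rfl|rfl|rfl|rfl|rfl|rfl <;> decide

theorem pvLkA2 {c1 c2 : Char} (h : pvPair c1 c2 = true) :
    PySem.Dict.get? pvDA [c1, c2] = some (pvL2 c1 c2) := by
  rcases pvPair_cases h with ⟨rfl, h2⟩ | ⟨rfl, h2⟩ <;>
    (rcases h2 with rfl|rfl|rfl|rfl|rfl|rfl|rfl|rfl|rfl|rfl <;> decide)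

-- A's scan decodes every valid string to pvDec
theorem pvGoA_valid : ∀ cs, pvValid cs = true → ∀ acc, pvGoA cs acc = some (acc ++ pvDec cs) := by
  intro cs
  induction cs using pvValid.induct with
  | case1 => intro _ acc; simp [pvGoA, pvDec]
  | case2 c =>
      intro h acc
      simp [pvValid] at h
      simp [pvGoA, pvLkA1 h, pvDec]
  | case3 c1 c2 =>
      intro h acc
      simp [pvValid] at h
      simp [pvGoA, pvLkA1 h.1, pvLkA1 h.2, pvDec]
  | case4 c1 c2 rest ih =>
      intro h acc
      simp [pvValid] at h
      simp [pvGoA, pvLkA2 h.1, pvDec, ih h.2]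
  | case5 c1 c2 c3 rest h3 ih =>
      intro h acc
      simp [pvValid, h3] at h
      simp [pvGoA, h3, pvLkA1 h.1, pvDec, ih h.2]

-- digits '0'-'9' (the pair '10'-'26' can end in '0', which pvDig excludes)
def pvDig10 (c : Char) : Bool :=
  decide (c ∈ ['0','1','2','3','4','5','6','7','8','9'])

theorem pvDig10_cases {c : Char} (h : pvDig10 c = true) :
    c = '0' ∨ c = '1' ∨ c = '2' ∨ c = '3' ∨ c = '4' ∨ c = '5' ∨ c = '6' ∨ c = '7' ∨ c = '8' ∨
      c = '9' := by
  simpa [pvDig10] using h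

theorem pvDig_dig10 {c : Char} (h : pvDig c = true) : pvDig10 c = true := by
  rcases pvDig_cases h with rfl|rfl|rfl|rfl|rfl|rfl|rfl|rfl|rfl <;> decide

theorem pvPair_dig10 {c1 c2 : Char} (h : pvPair c1 c2 = true) :
    pvDig10 c1 = true ∧ pvDig10 c2 = true := by
  rcases pvPair_cases h with ⟨rfl, h2⟩ | ⟨rfl, h2⟩ <;>
    (rcases h2 with rfl|rfl|rfl|rfl|rfl|rfl|rfl|rfl|rfl|rfl <;> decide)

-- B's digit step: a digit char pushes its provisional letter pvL1 c (code c.toNat + 48)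
theorem pvGoB_digit {c : Char} (h : pvDig10 c = true) (rest out : List Char) :
    pvGoB (c :: rest) out = pvGoB rest (pvL1 c :: out) := by
  rcases pvDig10_cases h with rfl|rfl|rfl|rfl|rfl|rfl|rfl|rfl|rfl|rfl <;>
    simp [pvGoB, pvL1, PySem.Int.ofStr?] <;> rfl

-- B's '#' step merges the two provisional letters of a pair into pvL2
theorem pvGoB_hash {c1 c2 : Char} (h : pvPair c1 c2 = true) (rest out : List Char) :
    pvGoB ('#' :: rest) (pvL1 c2 :: pvL1 c1 :: out) = pvGoB rest (pvL2 c1 c2 :: out) := by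
  have : Char.ofNat ((96 + 10 * (((pvL1 c1).toNat : Int) - 96) +
      (((pvL1 c2).toNat : Int) - 96)).toNat) = pvL2 c1 c2 := by
    rcases pvPair_cases h with ⟨rfl, h2⟩ | ⟨rfl, h2⟩ <;>
      (rcases h2 with rfl|rfl|rfl|rfl|rfl|rfl|rfl|rfl|rfl|rfl <;> decide)
  simp [pvGoB, this]

-- B's stack pass decodes every valid string to pvDec (letters land on the stack reversed)
theorem pvGoB_valid : ∀ cs, pvValid cs = true →
    ∀ out, pvGoB cs out = some ((pvDec cs).reverse ++ out) := by
  intro cs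
  induction cs using pvValid.induct with
  | case1 => intro _ out; simp [pvGoB, pvDec]
  | case2 c =>
      intro h out
      simp [pvValid] at h
      rw [pvGoB_digit (pvDig_dig10 h)]
      simp [pvGoB, pvDec]
  | case3 c1 c2 =>
      intro h out
      simp [pvValid] at h
      rw [pvGoB_digit (pvDig_dig10 h.1), pvGoB_digit (pvDig_dig10 h.2)]
      simp [pvGoB, pvDec]
  | case4 c1 c2 rest ih =>
      intro h out
      simp [pvValid] at h
      rw [pvGoB_digit (pvPair_dig10 h.1).1, pvGoB_digit (pvPair_dig10 h.1).2,
        pvGoB_hash h.1, ih h.2]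
      simp [pvDec]
  | case5 c1 c2 c3 rest h3 ih =>
      intro h out
      simp [pvValid, h3] at h
      rw [pvGoB_digit (pvDig_dig10 h.1), ih h.2]
      simp [pvDec, h3]

-- ===== VERDICT (by name: the statement is the Claim_ definition above) =====
theorem freqAlphabetsDict_spec : Claim_equal_freqAlphabetsDict := by
  intro s _ hpre
  unfold Spec_freqAlphabetsDict freqAlphabetsDict freqAlphabetsDict_alt
  rw [pvGoA_valid s.toList hpre [], pvGoB_valid s.toList hpre []]
  simp
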